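-- pv_equiv track=rewrite | github.com/koulmakgrat/kde_dnf_updates_notifier | updates_notifier.py | parse_updates
-- ===== SOURCE A (Python) =====
-- def parse_updates(output):
--     lines = output.strip().split("\n")
--     update_lines = []
--
--     # Найти пустую строку и начать собирать обновления после неё
--     found_empty_line = False
--     for line in lines:
--         if line.strip() == "":
--             found_empty_line = True
--         elif found_empty_line:
--             update_lines.append(line.split()[0])
--
--     return "\n".join(update_lines)
-- ===== SOURCE B (Python) =====
-- def parse_updates(output):
--     lines = output.strip().split("\n")
--     try:
--         i = next(k for k, l in enumerate(lines) if not l.strip())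
--     except StopIteration:
--         return ""
--     return "\n".join(l.split()[0] for l in lines[i + 1:] if l.strip())
-- ===== Notes on version B (the rewrite author's own statement) =====
-- stated objective: idiomatic
-- what changed: Replaces A's single stateful pass with a boolean flag by first locating the index of the first blank line, then slicing the tail and filter/map/join over it.
import Mathlib
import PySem

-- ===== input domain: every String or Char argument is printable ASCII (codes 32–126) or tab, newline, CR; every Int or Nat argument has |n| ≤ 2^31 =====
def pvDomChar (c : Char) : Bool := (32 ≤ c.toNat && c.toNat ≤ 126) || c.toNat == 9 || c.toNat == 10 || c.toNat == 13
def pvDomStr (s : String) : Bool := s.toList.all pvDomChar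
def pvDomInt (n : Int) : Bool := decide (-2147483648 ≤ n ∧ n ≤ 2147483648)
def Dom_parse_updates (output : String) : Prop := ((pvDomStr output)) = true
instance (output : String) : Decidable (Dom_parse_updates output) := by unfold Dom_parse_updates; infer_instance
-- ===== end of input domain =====

-- B finds the first blank line's index, then filter/map/joins the tail; same result as A's flag-driven single pass (idiomatic decomposition, same cost).

-- ===== PORT A =====
-- literal port of A: one fold carrying (found_empty_line, update_lines).
-- 'line.split()[0]' is ported as '(split₀ line).headD ""': it is only evaluated
-- when strip line ≠ "", where split₀ line is nonempty, so headD is exact there.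
def parse_updates (output : String) : String :=
  let lines := (PySem.Str.split? (PySem.Str.strip output) "\n").getD []
  let r := lines.foldl (fun (st : Bool × List String) line =>
    if PySem.Str.strip line == "" then (true, st.2)
    else if st.1 then (st.1, st.2 ++ [(PySem.Str.split₀ line).headD ""])
    else st) (false, [])
  PySem.Str.join "\n" r.2

-- ===== PORT B =====
def parse_updates_alt (output : String) : String :=
  let lines := (PySem.Str.split? (PySem.Str.strip output) "\n").getD []
  match lines.findIdx? (fun l => PySem.Str.strip l == "") with
  | none => ""
  | some i =>
      PySem.Str.join "\n"
        (((lines.drop (i + 1)).filter (fun l => !(PySem.Str.strip l == ""))).map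
          (fun l => (PySem.Str.split₀ l).headD ""))

-- ===== PRECONDITION & SPEC =====
def Spec_parse_updates (output : String) (out : String) : Prop := out = parse_updates_alt output
instance (output : String) (out : String) : Decidable (Spec_parse_updates output out) := by unfold Spec_parse_updates; infer_instance

-- ===== CLAIM (what is proved, stated in full; the proofs are below) =====
def Claim_equal_parse_updates : Prop := ∀ (output : String), Dom_parse_updates output → Spec_parse_updates output (parse_updates output)

-- ===== LEMMAS AND PROOFS =====

-- once the flag is true, A appends the token of every non-blank line
theorem pv_loop_true (ls : List String) (acc : List String) :
    ls.foldl (fun (st : Bool × List String) line =>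
      if PySem.Str.strip line == "" then (true, st.2)
      else if st.1 then (st.1, st.2 ++ [(PySem.Str.split₀ line).headD ""])
      else st) (true, acc)
    = (true, acc ++ (ls.filter (fun l => !(PySem.Str.strip l == ""))).map
        (fun l => (PySem.Str.split₀ l).headD "")) := by
  induction ls generalizing acc with
  | nil => simp
  | cons x xs ih =>
    simp only [List.foldl_cons]
    by_cases h : (PySem.Str.strip x == "") = true
    · rw [if_pos h, ih]
      simp [h]
    · rw [if_neg h]
      simp only [if_true]
      rw [ih]
      simp [h]

-- with the flag still false, A's result is the tail after the first blank line, filtered and tokenised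
theorem pv_loop_false (ls : List String) (acc : List String) :
    (ls.foldl (fun (st : Bool × List String) line =>
      if PySem.Str.strip line == "" then (true, st.2)
      else if st.1 then (st.1, st.2 ++ [(PySem.Str.split₀ line).headD ""])
      else st) (false, acc)).2
    = match ls.findIdx? (fun l => PySem.Str.strip l == "") with
      | none => acc
      | some i => acc ++ ((ls.drop (i + 1)).filter (fun l => !(PySem.Str.strip l == ""))).map
          (fun l => (PySem.Str.split₀ l).headD "") := by
  induction ls generalizing acc with
  | nil => simp
  | cons x xs ih =>
    simp only [List.foldl_cons]
    by_cases h : (PySem.Str.strip x == "") = true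
    · rw [if_pos h, pv_loop_true]
      simp [List.findIdx?_cons, h]
    · rw [if_neg h, if_neg Bool.false_ne_true, ih]
      simp only [List.findIdx?_cons, h, if_false, Bool.false_eq_true]
      cases hf : xs.findIdx? (fun l => PySem.Str.strip l == "") with
      | none => simp
      | some i => simp [List.drop_succ_cons]

-- A's whole body equals B's whole body, for any line list
theorem pv_main (ls : List String) :
    PySem.Str.join "\n" ((ls.foldl (fun (st : Bool × List String) line =>
      if PySem.Str.strip line == "" then (true, st.2)
      else if st.1 then (st.1, st.2 ++ [(PySem.Str.split₀ line).headD ""])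
      else st) (false, [])).2)
    = match ls.findIdx? (fun l => PySem.Str.strip l == "") with
      | none => ""
      | some i =>
          PySem.Str.join "\n"
            (((ls.drop (i + 1)).filter (fun l => !(PySem.Str.strip l == ""))).map
              (fun l => (PySem.Str.split₀ l).headD "")) := by
  rw [pv_loop_false]
  cases hf : ls.findIdx? (fun l => PySem.Str.strip l == "") with
  | none => rfl
  | some i => simp

-- ===== VERDICT (by name: the statement is the Claim_ definition above) =====
theorem parse_updates_spec : Claim_equal_parse_updates := by
  intro output _
  show parse_updates output = parse_updates_alt output
  simp only [parse_updates, parse_updates_alt]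
  exact pv_main ((PySem.Str.split? (PySem.Str.strip output) "\n").getD [])
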